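-- pv_equiv track=rewrite | github.com/jjsprockel/profundamente-adenocarcinoma | backend/app/core/rules_engine.py | resolve_conventional
-- ===== SOURCE A (Python) =====
-- Answers = dict[str, str]  # {"A1": "B", "C1": "A", ...}
--
-- _PATTERN_LABELS = {
--     "lepidico": "Adenocarcinoma con patrón lepídico",
--     "acinar": "Adenocarcinoma con patrón acinar",
--     "papilar": "Adenocarcinoma con patrón papilar",
--     "micropapilar": "Adenocarcinoma con patrón micropapilar",
--     "solido": "Adenocarcinoma con patrón sólido",
-- }
--
-- def resolve_conventional(scores: dict[str, int], answers: Answers) -> tuple[str, list[str]]: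
--     """
--     Aplica reglas de desempate y determina patrón principal y secundarios.
--     Documento: Reglas de desempate (Regla 1–5).
--     """
--     if all(v == 0 for v in scores.values()):
--         return "Patrón no determinado", []
--
--     sorted_patterns = sorted(scores.items(), key=lambda x: x[1], reverse=True)
--     top_key, top_score = sorted_patterns[0]
--     second_key, second_score = sorted_patterns[1] if len(sorted_patterns) > 1 else ("", 0)
--
--     # Regla 1: desempate por eje fibrovascular entre papilar y micropapilar
--     if top_key in ("papilar", "micropapilar") and abs(top_score - second_score) <= 2:
--         if answers.get("A2") == "A":
--             top_key = "papilar"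
--         elif answers.get("A2") == "B":
--             top_key = "micropapilar"
--
--     main = _PATTERN_LABELS.get(top_key, top_key)
--
--     # Regla 5: registrar secundarios si hay patrón mixto
--     secondary_labels: list[str] = []
--     is_mixed = answers.get("A1") == "J" or answers.get("CE3") in ("B", "C")
--     if is_mixed and second_score > 0:
--         secondary_labels.append(_PATTERN_LABELS.get(second_key, second_key))
--
--     # Anotación especial por cribiforme (documento 2B nota)
--     if answers.get("A3") == "C" and top_key == "acinar":
--         main += " (componente glandular complejo/cribiforme de alto grado)"
--
--     return main, secondary_labels
-- ===== SOURCE B (Python) =====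
-- _PATTERN_LABELS = {
--     "lepidico": "Adenocarcinoma con patrón lepídico",
--     "acinar": "Adenocarcinoma con patrón acinar",
--     "papilar": "Adenocarcinoma con patrón papilar",
--     "micropapilar": "Adenocarcinoma con patrón micropapilar",
--     "solido": "Adenocarcinoma con patrón sólido",
-- }
--
--
-- def _label(key):
--     return _PATTERN_LABELS.get(key, key)
--
--
-- def _argmax(items):
--     # First entry with maximal score, plus the remaining items (order kept).
--     best_i, best = 0, items[0]
--     i = 0
--     for item in items[1:]:
--         i += 1
--         if item[1] > best[1]:
--             best_i, best = i, item
--     return best, items[:best_i] + items[best_i + 1:]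
--
--
-- def resolve_conventional(scores, answers):
--     # Two selection passes (argmax, then argmax of the rest) instead of a sort.
--     items = list(scores.items())
--     if not any(v != 0 for _, v in items):
--         return "Patrón no determinado", []
--
--     top, rest = _argmax(items)
--     top_key, top_score = top
--     second_key, second_score = _argmax(rest)[0] if rest else ("", 0)
--
--     # Regla 1: desempate por eje fibrovascular entre papilar y micropapilar
--     if top_key in ("papilar", "micropapilar") and -2 <= top_score - second_score <= 2:
--         a2 = answers.get("A2")
--         if a2 == "A":
--             top_key = "papilar"
--         elif a2 == "B":
--             top_key = "micropapilar"
--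
--     main = _label(top_key)
--
--     # Anotación especial por cribiforme (documento 2B nota)
--     if answers.get("A3") == "C" and top_key == "acinar":
--         main += " (componente glandular complejo/cribiforme de alto grado)"
--
--     # Regla 5: registrar secundarios si hay patrón mixto
--     mixed = answers.get("A1") == "J" or answers.get("CE3") in ("B", "C")
--     secondary = [_label(second_key)] if mixed and second_score > 0 else []
--     return main, secondary
-- ===== Notes on version B (the rewrite author's own statement) =====
-- stated objective: alternative
-- what changed: Replaces the full descending sort of scores.items() plus index-0/index-1 reads with two recursive selection passes: _argmax extracts the first maximal entry and the remaining list, and a second _argmax over the rest yields the runner-up; tie-break and label rules unchanged.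
import Mathlib
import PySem

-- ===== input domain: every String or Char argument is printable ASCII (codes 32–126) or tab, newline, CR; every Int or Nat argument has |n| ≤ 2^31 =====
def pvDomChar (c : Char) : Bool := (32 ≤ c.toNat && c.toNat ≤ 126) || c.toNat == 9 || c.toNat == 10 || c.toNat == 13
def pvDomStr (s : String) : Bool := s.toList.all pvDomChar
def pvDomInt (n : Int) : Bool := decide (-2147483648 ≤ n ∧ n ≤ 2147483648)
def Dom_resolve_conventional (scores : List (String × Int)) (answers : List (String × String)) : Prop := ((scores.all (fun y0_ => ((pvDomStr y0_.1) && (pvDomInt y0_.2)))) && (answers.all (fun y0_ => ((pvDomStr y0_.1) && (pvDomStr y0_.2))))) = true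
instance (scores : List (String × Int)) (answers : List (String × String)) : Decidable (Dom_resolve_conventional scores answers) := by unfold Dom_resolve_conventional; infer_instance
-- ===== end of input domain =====

-- B replaces A's full descending sort of the score dict by two linear selection
-- passes (first maximal entry + remainder, then the runner-up from the remainder).

-- _PATTERN_LABELS (module constant, shared by both Pythons)
def pvLabels : PySem.Dict String String :=
  PySem.Dict.ofList
    [("lepidico", "Adenocarcinoma con patrón lepídico"),
     ("acinar", "Adenocarcinoma con patrón acinar"),
     ("papilar", "Adenocarcinoma con patrón papilar"),
     ("micropapilar", "Adenocarcinoma con patrón micropapilar"),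
     ("solido", "Adenocarcinoma con patrón sólido")]

-- ===== PORT A =====
def resolve_conventional (scores : List (String × Int)) (answers : List (String × String)) : String × List String :=
  let d := PySem.Dict.ofList scores
  let ans := PySem.Dict.ofList answers
  if d.values.all (fun v => v == 0) then ("Patrón no determinado", [])
  else
    let sp := PySem.List.sorted d.items (fun x => x.2) true
    -- sorted_patterns[0]: sp is nonempty here (some value ≠ 0), so headD's default is unreachable
    let tp := sp.headD ("", 0)
    -- sorted_patterns[1] if len(sorted_patterns) > 1 else ("", 0)
    let sd := sp.tail.headD ("", 0)
    -- Regla 1: desempate por eje fibrovascular entre papilar y micropapilar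
    let top_key :=
      if (tp.1 == "papilar" || tp.1 == "micropapilar")
          && decide ((tp.2 - sd.2).natAbs ≤ 2) then
        if ans.get? "A2" == some "A" then "papilar"
        else if ans.get? "A2" == some "B" then "micropapilar"
        else tp.1
      else tp.1
    let main := pvLabels.getD top_key top_key
    -- Regla 5: registrar secundarios si hay patrón mixto
    let is_mixed := ans.get? "A1" == some "J" || (ans.get? "CE3" == some "B" || ans.get? "CE3" == some "C")
    let secondary_labels := if is_mixed && decide (sd.2 > 0) then [pvLabels.getD sd.1 sd.1] else []
    -- Anotación especial por cribiforme (documento 2B nota)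
    let main := if ans.get? "A3" == some "C" && top_key == "acinar" then
        main ++ " (componente glandular complejo/cribiforme de alto grado)"
      else main
    (main, secondary_labels)

-- ===== PORT B =====
-- _label
def pvLabel (key : String) : String := pvLabels.getD key key

-- the body of _argmax's for-loop; state = (i, best_i, best)
def pvStepMax (st : Nat × Nat × (String × Int)) (item : String × Int) : Nat × Nat × (String × Int) :=
  let i := st.1 + 1
  if item.2 > st.2.2.2 then (i, i, item) else (i, st.2.1, st.2.2)

-- _argmax (python's items[0] raises IndexError on []; that is unreachable, ported as a default)
def pvArgmaxB (items : List (String × Int)) : (String × Int) × List (String × Int) :=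
  match items with
  | [] => (("", 0), [])
  | h :: t =>
    let st := t.foldl pvStepMax (0, 0, h)
    -- items[:best_i] + items[best_i + 1:] (slices with in-range nonnegative bounds = take/drop)
    (st.2.2, (h :: t).take st.2.1 ++ (h :: t).drop (st.2.1 + 1))

def resolve_conventional_alt (scores : List (String × Int)) (answers : List (String × String)) : String × List String :=
  let items := (PySem.Dict.ofList scores).items
  if !(items.any (fun p => p.2 != 0)) then ("Patrón no determinado", [])
  else
    let tr := pvArgmaxB items
    let tp := tr.1
    let rest := tr.2
    let sd := if rest = [] then ("", 0) else (pvArgmaxB rest).1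
    let ans := PySem.Dict.ofList answers
    -- Regla 1: desempate entre papilar y micropapilar
    let top_key :=
      if (tp.1 == "papilar" || tp.1 == "micropapilar")
          && decide (-2 ≤ tp.2 - sd.2 ∧ tp.2 - sd.2 ≤ 2) then
        match ans.get? "A2" with
        | some "A" => "papilar"
        | some "B" => "micropapilar"
        | _ => tp.1
      else tp.1
    let main := pvLabel top_key
    -- Anotación cribiforme
    let main := if ans.get? "A3" == some "C" && top_key == "acinar" then
        main ++ " (componente glandular complejo/cribiforme de alto grado)"
      else main
    -- Regla 5: secundarios si patrón mixto
    let mixed := ans.get? "A1" == some "J" || (ans.get? "CE3" == some "B" || ans.get? "CE3" == some "C")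
    let secondary := if mixed && decide (sd.2 > 0) then [pvLabel sd.1] else []
    (main, secondary)

-- ===== PRECONDITION & SPEC =====
def Spec_resolve_conventional (scores : List (String × Int)) (answers : List (String × String)) (out : String × List String) : Prop := out = resolve_conventional_alt scores answers
instance (scores : List (String × Int)) (answers : List (String × String)) (out : String × List String) : Decidable (Spec_resolve_conventional scores answers out) := by unfold Spec_resolve_conventional; infer_instance

-- ===== CLAIM (what is proved, stated in full; the proofs are below) =====
def Claim_equal_resolve_conventional : Prop := ∀ (scores : List (String × Int)) (answers : List (String × String)), Dom_resolve_conventional scores answers → Spec_resolve_conventional scores answers (resolve_conventional scores answers)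

-- ===== LEMMAS AND PROOFS =====

-- recursive specification of _argmax: first maximal entry + remainder
def pvArgmax : List (String × Int) → Option ((String × Int) × List (String × Int))
  | [] => none
  | head :: tail =>
    match pvArgmax tail with
    | none => some (head, [])
    | some (m, r) => if m.2 > head.2 then some (m, head :: r) else some (head, tail)

-- pvArgmax returns none exactly on the empty list
lemma pvArgmax_none_iff (l : List (String × Int)) : pvArgmax l = none ↔ l = [] := by
  cases l with
  | nil => simp [pvArgmax]
  | cons a t =>
    simp only [pvArgmax]
    cases pvArgmax t with
    | none => simp
    | some p => by_cases h : p.1.2 > a.2 <;> simp [h]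

-- how pvArgmax reacts to appending one element at the end
lemma pvArgmax_append (l : List (String × Int)) (x : String × Int) :
    pvArgmax (l ++ [x]) =
      match pvArgmax l with
      | none => some (x, [])
      | some (m, r) => if x.2 > m.2 then some (x, l) else some (m, r ++ [x]) := by
  induction l with
  | nil => rfl
  | cons a l ih =>
    cases hl : pvArgmax l with
    | none =>
      have hl0 := (pvArgmax_none_iff l).mp hl
      subst hl0
      by_cases h : x.2 > a.2 <;> simp [pvArgmax, h]
    | some p =>
      obtain ⟨m, r⟩ := p
      rw [List.cons_append]
      simp only [pvArgmax, ih, hl]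
      by_cases hma : m.2 > a.2
      · by_cases hxm : x.2 > m.2
        · have hxa : x.2 > a.2 := lt_trans hma hxm
          simp [hma, hxm, hxa]
        · simp [hma, hxm]
      · by_cases hxm : x.2 > m.2
        · by_cases hxa : x.2 > a.2 <;> simp [hma, hxm, hxa]
        · have hxa : ¬ x.2 > a.2 := by
            simp only [gt_iff_lt, not_lt] at hma hxm ⊢
            omega
          simp [hma, hxm, hxa]

-- loop invariant of _argmax's fold: counter = length processed, best index in range,
-- and (best, split around best) is exactly pvArgmax of the list seen so far
lemma pvFoldMax (t : List (String × Int)) (h : String × Int) :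
    (t.foldl pvStepMax (0, 0, h)).1 = t.length ∧
    (t.foldl pvStepMax (0, 0, h)).2.1 ≤ t.length ∧
    pvArgmax (h :: t) =
      some ((t.foldl pvStepMax (0, 0, h)).2.2,
        (h :: t).take (t.foldl pvStepMax (0, 0, h)).2.1 ++
          (h :: t).drop ((t.foldl pvStepMax (0, 0, h)).2.1 + 1)) := by
  induction t using List.reverseRecOn with
  | nil => simp [pvArgmax]
  | append_singleton t x ih =>
    obtain ⟨hi, hbi, harg⟩ := ih
    have hcons : h :: (t ++ [x]) = (h :: t) ++ [x] := rfl
    rw [List.foldl_append, List.foldl_cons, List.foldl_nil, hcons, pvArgmax_append, harg]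
    set st := t.foldl pvStepMax (0, 0, h) with hst
    by_cases hx : x.2 > st.2.2.2
    · have hstep : pvStepMax st x = (st.1 + 1, st.1 + 1, x) := by
        simp [pvStepMax, hx]
      rw [hstep]
      dsimp only
      rw [if_pos hx]
      refine ⟨by simp [hi], by simp [hi], ?_⟩
      have e1 : ((h :: t) ++ [x]).take (st.1 + 1) = h :: t := by
        rw [hi]
        have hlen : (h :: t).length = t.length + 1 := by simp
        rw [← hlen, List.take_left]
      have e2 : ((h :: t) ++ [x]).drop (st.1 + 1 + 1) = [] := by
        apply List.drop_eq_nil_of_le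
        simp [hi]
      rw [e1, e2, List.append_nil]
    · have hstep : pvStepMax st x = (st.1 + 1, st.2.1, st.2.2) := by
        simp [pvStepMax, hx]
      rw [hstep]
      dsimp only
      rw [if_neg hx]
      refine ⟨by simp [hi], by simp; omega, ?_⟩
      have hlt : st.2.1 ≤ (h :: t).length := by simp; omega
      have hlt2 : st.2.1 + 1 ≤ (h :: t).length := by simp; omega
      rw [List.take_append_of_le_length hlt, List.drop_append_of_le_length hlt2, List.append_assoc]

-- the port's iterative _argmax agrees with the recursive specification
lemma pvArgmaxB_eq (l : List (String × Int)) (m : String × Int) (r : List (String × Int))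
    (h : pvArgmax l = some (m, r)) : pvArgmaxB l = (m, r) := by
  cases l with
  | nil => simp [pvArgmax] at h
  | cons a t =>
    obtain ⟨_, _, harg⟩ := pvFoldMax t a
    rw [h] at harg
    simp only [Option.some.injEq, Prod.mk.injEq] at harg
    obtain ⟨h1, h2⟩ := harg
    simp only [pvArgmaxB]
    rw [h1, h2]

-- front-stable insertion: a goes before the first element whose score is ≤ a.2
def pvInsF (a : String × Int) : List (String × Int) → List (String × Int)
  | [] => [a]
  | b :: t => if a.2 < b.2 then b :: pvInsF a t else a :: b :: t

-- the back-insertion of the insertion sort commutes with the front-stable insertion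
lemma pvIns_insF (s : List (String × Int)) (x a : String × Int) :
    PySem.List.insertBy (fun p q => decide (q.2 < p.2)) x (pvInsF a s) =
      pvInsF a (PySem.List.insertBy (fun p q => decide (q.2 < p.2)) x s) := by
  induction s with
  | nil =>
    by_cases h : a.2 < x.2 <;>
      simp [pvInsF, PySem.List.insertBy, h]
  | cons b t ih =>
    by_cases hab : a.2 < b.2
    · by_cases hbx : b.2 < x.2
      · have hax : a.2 < x.2 := lt_trans hab hbx
        simp [pvInsF, PySem.List.insertBy, hab, hbx, hax]
      · simp [pvInsF, PySem.List.insertBy, hab, hbx, ih]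
    · by_cases hbx : b.2 < x.2
      · by_cases hax : a.2 < x.2 <;>
          simp [pvInsF, PySem.List.insertBy, hab, hbx, hax]
      · have hax : ¬ a.2 < x.2 := by omega
        simp [pvInsF, PySem.List.insertBy, hab, hbx, hax]

lemma pvFoldl_insF (t : List (String × Int)) (s : List (String × Int)) (a : String × Int) :
    t.foldl (fun acc x => PySem.List.insertBy (fun p q => decide (q.2 < p.2)) x acc) (pvInsF a s) =
      pvInsF a (t.foldl (fun acc x => PySem.List.insertBy (fun p q => decide (q.2 < p.2)) x acc) s) := by
  induction t generalizing s with
  | nil => rfl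
  | cons x t ih => simp only [List.foldl_cons, pvIns_insF, ih]

-- stable descending sort of a cons = front-stable insertion into the sorted tail
lemma pvSorted_cons (a : String × Int) (l : List (String × Int)) :
    PySem.List.sorted (a :: l) (fun x => x.2) true = pvInsF a (PySem.List.sorted l (fun x => x.2) true) := by
  rw [PySem.List.sorted_rev_eq_foldl_insertBy, PySem.List.sorted_rev_eq_foldl_insertBy]
  have h0 : PySem.List.insertBy (fun p q => decide ((q : String × Int).2 < p.2)) a [] = pvInsF a [] := rfl
  simp only [List.foldl_cons, h0, pvFoldl_insF]

-- _argmax returns exactly the head of the stable descending sort, and its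
-- remainder sorts to the tail of that sort
lemma pvArgmax_sorted (l : List (String × Int)) (m : String × Int) (r : List (String × Int))
    (h : pvArgmax l = some (m, r)) :
    PySem.List.sorted l (fun x => x.2) true = m :: PySem.List.sorted r (fun x => x.2) true := by
  induction l generalizing m r with
  | nil => simp [pvArgmax] at h
  | cons a t ih =>
    rw [pvSorted_cons]
    cases ht : pvArgmax t with
    | none =>
      have ht0 := (pvArgmax_none_iff t).mp ht
      subst ht0
      simp only [pvArgmax, Option.some.injEq, Prod.mk.injEq] at h
      obtain ⟨h1, h2⟩ := h
      subst h1; subst h2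
      rfl
    | some p =>
      obtain ⟨m0, r0⟩ := p
      have hst := ih m0 r0 ht
      rw [hst]
      simp only [pvArgmax, ht] at h
      by_cases hcmp : m0.2 > a.2
      · simp only [hcmp, if_pos, Option.some.injEq, Prod.mk.injEq] at h
        obtain ⟨h1, h2⟩ := h
        subst h1; subst h2
        simp only [pvInsF, if_pos hcmp, pvSorted_cons]
      · simp only [hcmp, Option.some.injEq, Prod.mk.injEq, if_false] at h
        obtain ⟨h1, h2⟩ := h
        subst h1; subst h2
        have hna : ¬ a.2 < m0.2 := hcmp
        simp only [pvInsF, if_neg hna]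
        rw [← hst]

lemma pvAllZero (l : List (String × Int)) :
    (l.map (fun p => p.2)).all (fun v => v == 0) = !(l.any (fun p => p.2 != 0)) := by
  induction l with
  | nil => rfl
  | cons a t ih => simp [ih, bne]

-- A's abs-≤-2 test and B's two-sided test are the same Boolean
lemma pvAbsTest (d : Int) : decide (d.natAbs ≤ 2) = decide (-2 ≤ d ∧ d ≤ 2) := by
  by_cases h : -2 ≤ d ∧ d ≤ 2
  · have : d.natAbs ≤ 2 := by omega
    simp [h, this]
  · have : ¬ d.natAbs ≤ 2 := by omega
    simp [h, this]

-- A's if-chain on answers["A2"] and B's match are the same selection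
lemma pvA2Sel (o : Option String) (tk : String) :
    (if o = some "A" then "papilar" else if o = some "B" then "micropapilar" else tk) =
      (match o with | some "A" => "papilar" | some "B" => "micropapilar" | _ => tk) := by
  cases o with
  | none => simp
  | some s =>
    by_cases h1 : s = "A"
    · subst h1; rfl
    · by_cases h2 : s = "B"
      · subst h2; rfl
      · have e3 : (match some s with | some "A" => "papilar" | some "B" => "micropapilar" | _ => tk) = tk := by
          split <;> simp_all
        rw [e3]
        simp [h1, h2]

-- ===== VERDICT (by name: the statement is the Claim_ definition above) =====
theorem resolve_conventional_spec : Claim_equal_resolve_conventional := by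
  intro scores answers _
  unfold Spec_resolve_conventional resolve_conventional resolve_conventional_alt
  simp only [PySem.Dict.values, pvAllZero]
  cases hz : (PySem.Dict.ofList scores).items.any (fun p => p.2 != 0) with
  | false => simp
  | true =>
    simp only [Bool.not_true, Bool.false_eq_true, if_false]
    have hne : (PySem.Dict.ofList scores).items ≠ [] := by
      intro h; rw [h] at hz; simp at hz
    cases ha : pvArgmax (PySem.Dict.ofList scores).items with
    | none => exact absurd ((pvArgmax_none_iff _).mp ha) hne
    | some p =>
      obtain ⟨m, r⟩ := p
      have hs := pvArgmax_sorted _ m r ha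
      rw [hs, pvArgmaxB_eq _ m r ha]
      cases r with
      | nil =>
        rw [if_pos rfl]
        simp [pvLabel, pvAbsTest, pvA2Sel, PySem.List.sorted]
      | cons b u =>
        rw [if_neg (List.cons_ne_nil b u)]
        cases har : pvArgmax (b :: u) with
        | none =>
          rw [pvArgmax_none_iff] at har
          simp at har
        | some q =>
          obtain ⟨m2, r2⟩ := q
          have hs2 := pvArgmax_sorted _ m2 r2 har
          rw [pvArgmaxB_eq _ m2 r2 har, hs2]
          simp [pvLabel, pvAbsTest, pvA2Sel]
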